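-- pv_equiv track=rewrite | github.com/boehc/Data2DollarFS26-Gruppenarbeit | Maximilian/Website/interactive_explorer_v2.py | build_skill_chips
-- ===== SOURCE A (Python) =====
-- CAT_COLORS = {
--     "Fachkompetenz":      "#2196F3",
--     "TechSkill":          "#FF5722",
--     "Sozialkompetenz":    "#4CAF50",
--     "Methodenkompetenz":  "#FF9800",
--     "Personalkompetenz":  "#E91E63",
-- }
--
-- CAT_BG = {
--     "Fachkompetenz":      "#e3f2fd",
--     "TechSkill":          "#fbe9e7",
--     "Sozialkompetenz":    "#e8f5e9",
--     "Methodenkompetenz":  "#fff3e0",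
--     "Personalkompetenz":  "#fce4ec",
-- }
--
-- CAT_ICONS = {
--     "Fachkompetenz": "🎓", "TechSkill": "💻",
--     "Sozialkompetenz": "🤝", "Methodenkompetenz": "📋",
--     "Personalkompetenz": "💡",
-- }
--
-- def clean_skill(col):
--     name = col.split("_", 1)[1] if "_" in col else col
--     return name.replace("_", " ")
--
-- def categorize_skill(col):
--     if col.startswith("FK_"): return "Fachkompetenz"
--     if col.startswith("FD_"): return "TechSkill"
--     if col.startswith("SK_"): return "Sozialkompetenz"
--     if col.startswith("MK_"): return "Methodenkompetenz"
--     if col.startswith("PK_"): return "Personalkompetenz"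
--     return "Andere"
--
-- def build_skill_chips(skill_list):
--     """Erzeugt farbige Chips pro Kategorie, gruppiert in Boxen."""
--     by_cat = {}
--     for s in skill_list:
--         cat = categorize_skill(s)
--         by_cat.setdefault(cat, []).append(clean_skill(s))
--
--     if not by_cat:
--         return "<p class='empty-msg'>Keine Skills erkannt</p>"
--
--     html_parts = []
--     for cat in ["Fachkompetenz", "TechSkill", "Sozialkompetenz", "Methodenkompetenz", "Personalkompetenz"]:
--         if cat not in by_cat:
--             continue
--         icon = CAT_ICONS[cat]
--         color = CAT_COLORS[cat]
--         bg = CAT_BG[cat]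
--         chips = "".join(
--             f"<span class='chip' style='background:{bg};color:{color};border:1px solid {color}30;'>{name}</span>"
--             for name in by_cat[cat]
--         )
--         html_parts.append(
--             f"<div class='skill-group'>"
--             f"<div class='skill-group-label' style='color:{color};'>{icon} {cat}</div>"
--             f"<div class='chip-wrap'>{chips}</div>"
--             f"</div>"
--         )
--     return "".join(html_parts)
-- ===== SOURCE B (Python) =====
-- CAT_COLORS = {
--     "Fachkompetenz":      "#2196F3",
--     "TechSkill":          "#FF5722",
--     "Sozialkompetenz":    "#4CAF50",
--     "Methodenkompetenz":  "#FF9800",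
--     "Personalkompetenz":  "#E91E63",
-- }
--
-- CAT_BG = {
--     "Fachkompetenz":      "#e3f2fd",
--     "TechSkill":          "#fbe9e7",
--     "Sozialkompetenz":    "#e8f5e9",
--     "Methodenkompetenz":  "#fff3e0",
--     "Personalkompetenz":  "#fce4ec",
-- }
--
-- CAT_ICONS = {
--     "Fachkompetenz": "🎓", "TechSkill": "💻",
--     "Sozialkompetenz": "🤝", "Methodenkompetenz": "📋",
--     "Personalkompetenz": "💡",
-- }
--
-- CATS = [("FK_", "Fachkompetenz"), ("FD_", "TechSkill"),
--         ("SK_", "Sozialkompetenz"), ("MK_", "Methodenkompetenz"),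
--         ("PK_", "Personalkompetenz")]
--
-- def clean_skill(col):
--     name = col.split("_", 1)[1] if "_" in col else col
--     return name.replace("_", " ")
--
-- def build_skill_chips(skill_list):
--     """One pass per category: filter by prefix, emit the group directly (no dict)."""
--     skills = list(skill_list)
--     if not skills:
--         return "<p class='empty-msg'>Keine Skills erkannt</p>"
--     out = []
--     for prefix, cat in CATS:
--         names = [clean_skill(s) for s in skills if s.startswith(prefix)]
--         if not names:
--             continue
--         color, bg, icon = CAT_COLORS[cat], CAT_BG[cat], CAT_ICONS[cat]
--         chips = "".join(
--             f"<span class='chip' style='background:{bg};color:{color};border:1px solid {color}30;'>{n}</span>"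
--             for n in names
--         )
--         out.append(
--             f"<div class='skill-group'>"
--             f"<div class='skill-group-label' style='color:{color};'>{icon} {cat}</div>"
--             f"<div class='chip-wrap'>{chips}</div>"
--             f"</div>"
--         )
--     return "".join(out)
-- ===== Notes on version B (the rewrite author's own statement) =====
-- stated objective: simpler
-- what changed: B drops A's dict-grouping pass (setdefault/append keyed by category) and instead, after an empty check, filters the list once per fixed category prefix and emits each group's HTML directly.
import Mathlib
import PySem

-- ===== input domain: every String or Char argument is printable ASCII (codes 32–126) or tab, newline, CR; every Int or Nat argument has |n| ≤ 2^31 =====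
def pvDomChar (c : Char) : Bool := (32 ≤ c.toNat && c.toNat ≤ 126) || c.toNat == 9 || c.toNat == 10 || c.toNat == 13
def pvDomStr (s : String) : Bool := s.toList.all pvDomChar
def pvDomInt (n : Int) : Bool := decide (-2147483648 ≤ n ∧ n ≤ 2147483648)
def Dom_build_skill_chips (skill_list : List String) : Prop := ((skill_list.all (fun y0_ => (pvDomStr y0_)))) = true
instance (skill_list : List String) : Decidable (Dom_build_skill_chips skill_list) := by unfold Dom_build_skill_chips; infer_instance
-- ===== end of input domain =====

-- B replaces A's dict-grouping pass by a direct filter per category in display order (no dict); objective: simpler.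

-- ===== PORT A =====
-- shared module constants (dict literals) and helpers, used by both Pythons verbatim
def pvCatColors : PySem.Dict String String := PySem.Dict.ofList
  [("Fachkompetenz", "#2196F3"), ("TechSkill", "#FF5722"), ("Sozialkompetenz", "#4CAF50"),
   ("Methodenkompetenz", "#FF9800"), ("Personalkompetenz", "#E91E63")]

def pvCatBg : PySem.Dict String String := PySem.Dict.ofList
  [("Fachkompetenz", "#e3f2fd"), ("TechSkill", "#fbe9e7"), ("Sozialkompetenz", "#e8f5e9"),
   ("Methodenkompetenz", "#fff3e0"), ("Personalkompetenz", "#fce4ec")]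

def pvCatIcons : PySem.Dict String String := PySem.Dict.ofList
  [("Fachkompetenz", "🎓"), ("TechSkill", "💻"), ("Sozialkompetenz", "🤝"),
   ("Methodenkompetenz", "📋"), ("Personalkompetenz", "💡")]

-- clean_skill: the [1] index and the KeyError-free dict lookups are guarded in the Python; the .getD defaults are unreachable
def clean_skill (col : String) : String :=
  let name := if PySem.Str.isIn "_" col
    then (PySem.List.pyGet? ((PySem.Str.splitMax? col "_" 1).getD []) 1).getD col
    else col
  PySem.Str.replace name "_" " "

def categorize_skill (col : String) : String :=
  if PySem.Str.startswith col "FK_" then "Fachkompetenz"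
  else if PySem.Str.startswith col "FD_" then "TechSkill"
  else if PySem.Str.startswith col "SK_" then "Sozialkompetenz"
  else if PySem.Str.startswith col "MK_" then "Methodenkompetenz"
  else if PySem.Str.startswith col "PK_" then "Personalkompetenz"
  else "Andere"

-- the two f-string templates (identical text in A and B)
def pvChipHtml (bg color name : String) : String :=
  "<span class='chip' style='background:" ++ bg ++ ";color:" ++ color ++ ";border:1px solid " ++ color ++ "30;'>" ++ name ++ "</span>"

def pvGroupHtml (color icon cat chips : String) : String :=
  "<div class='skill-group'><div class='skill-group-label' style='color:" ++ color ++ ";'>" ++ icon ++ " " ++ cat ++ "</div><div class='chip-wrap'>" ++ chips ++ "</div></div>"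

-- A's grouping loop: by_cat.setdefault(cat, []).append(clean_skill(s)) is d.modify cat [] (· ++ [clean s])
def pvByCat (skill_list : List String) : PySem.Dict String (List String) :=
  skill_list.foldl (fun d s => d.modify (categorize_skill s) [] (fun ls => ls ++ [clean_skill s])) PySem.Dict.empty

def build_skill_chips (skill_list : List String) : String :=
  let by_cat := pvByCat skill_list
  if by_cat.items = [] then "<p class='empty-msg'>Keine Skills erkannt</p>"
  else
    let html_parts : List String :=
      ["Fachkompetenz", "TechSkill", "Sozialkompetenz", "Methodenkompetenz", "Personalkompetenz"].foldl
        (fun parts cat =>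
          if by_cat.contains cat = false then parts
          else
            let icon := pvCatIcons.getD cat ""
            let color := pvCatColors.getD cat ""
            let bg := pvCatBg.getD cat ""
            let chips := PySem.Str.join "" ((by_cat.getD cat []).map (fun name => pvChipHtml bg color name))
            parts ++ [pvGroupHtml color icon cat chips]) []
    PySem.Str.join "" html_parts

-- ===== PORT B =====
def build_skill_chips_alt (skill_list : List String) : String :=
  if skill_list = [] then "<p class='empty-msg'>Keine Skills erkannt</p>"
  else
    let out : List String :=
      [("FK_", "Fachkompetenz"), ("FD_", "TechSkill"), ("SK_", "Sozialkompetenz"),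
       ("MK_", "Methodenkompetenz"), ("PK_", "Personalkompetenz")].foldl
        (fun out pc =>
          let names := (skill_list.filter (fun s => PySem.Str.startswith s pc.1)).map clean_skill
          if names = [] then out
          else
            let color := pvCatColors.getD pc.2 ""
            let bg := pvCatBg.getD pc.2 ""
            let icon := pvCatIcons.getD pc.2 ""
            let chips := PySem.Str.join "" (names.map (fun n => pvChipHtml bg color n))
            out ++ [pvGroupHtml color icon pc.2 chips]) []
    PySem.Str.join "" out

-- ===== PRECONDITION & SPEC =====
def Spec_build_skill_chips (skill_list : List String) (out : String) : Prop := out = build_skill_chips_alt skill_list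
instance (skill_list : List String) (out : String) : Decidable (Spec_build_skill_chips skill_list out) := by unfold Spec_build_skill_chips; infer_instance

-- ===== CLAIM (what is proved, stated in full; the proofs are below) =====
def Claim_equal_build_skill_chips : Prop := ∀ (skill_list : List String), Dom_build_skill_chips skill_list → Spec_build_skill_chips skill_list (build_skill_chips skill_list)

-- ===== LEMMAS AND PROOFS =====

-- two distinct equal-length prefixes cannot both start the same string
theorem pv_startswith_excl (s p q : String) (hlen : p.toList.length = q.toList.length)
    (hne : p.toList ≠ q.toList) (h : PySem.Str.startswith s p = true) :
    PySem.Str.startswith s q = false := by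
  rw [PySem.Str.startswith_eq] at h ⊢
  rw [PySem.Chars.startswith_iff] at h
  cases hq : PySem.Chars.startswith s.toList q.toList with
  | false => rfl
  | true =>
    rw [PySem.Chars.startswith_iff] at hq
    exact absurd ((List.prefix_of_prefix_length_le h hq (le_of_eq hlen)).eq_of_length hlen) hne

theorem pv_cat_char (s : String) :
    ((categorize_skill s == "Fachkompetenz") = PySem.Str.startswith s "FK_") ∧
    ((categorize_skill s == "TechSkill") = PySem.Str.startswith s "FD_") ∧
    ((categorize_skill s == "Sozialkompetenz") = PySem.Str.startswith s "SK_") ∧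
    ((categorize_skill s == "Methodenkompetenz") = PySem.Str.startswith s "MK_") ∧
    ((categorize_skill s == "Personalkompetenz") = PySem.Str.startswith s "PK_") := by
  have E : ∀ p q : String, p.toList.length = q.toList.length → p.toList ≠ q.toList →
      PySem.Str.startswith s p = true → PySem.Str.startswith s q = false :=
    fun p q h1 h2 h3 => pv_startswith_excl s p q h1 h2 h3
  refine ⟨?_, ?_, ?_, ?_, ?_⟩ <;>
    (simp only [categorize_skill]; split_ifs with h1 h2 h3 h4 h5 <;>
      first
        | (simp_all; done)
        | (rw [E "FK_" "FD_" (by decide) (by decide) h1]; decide)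
        | (rw [E "FK_" "SK_" (by decide) (by decide) h1]; decide)
        | (rw [E "FK_" "MK_" (by decide) (by decide) h1]; decide)
        | (rw [E "FK_" "PK_" (by decide) (by decide) h1]; decide)
        | (rw [E "FD_" "SK_" (by decide) (by decide) h2]; decide)
        | (rw [E "FD_" "MK_" (by decide) (by decide) h2]; decide)
        | (rw [E "FD_" "PK_" (by decide) (by decide) h2]; decide)
        | (rw [E "SK_" "MK_" (by decide) (by decide) h3]; decide)
        | (rw [E "SK_" "PK_" (by decide) (by decide) h3]; decide)
        | (rw [E "MK_" "PK_" (by decide) (by decide) h4]; decide))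

theorem pv_getD_pvByCat (l : List String) (c : String) :
    (pvByCat l).getD c [] = ((l.filter (fun s => categorize_skill s == c)).map clean_skill) := by
  have hfold : pvByCat l =
      (l.map (fun s => (categorize_skill s, clean_skill s))).foldl
        (fun d p => d.modify p.1 [] (fun ls => ls ++ [p.2])) PySem.Dict.empty := by
    rw [List.foldl_map]; rfl
  rw [hfold, PySem.Dict.getD_foldl_modify_append]
  simp only [List.filter_map, List.map_map, PySem.Dict.getD_empty, List.nil_append]
  rfl

theorem pv_keys_pvByCat (l : List String) :
    (pvByCat l).keys = PySem.Set.ofList (l.map categorize_skill) := by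
  have := PySem.Dict.keys_foldl_modify_key l categorize_skill ([] : List String)
    (fun _ s ls => ls ++ [clean_skill s]) PySem.Dict.empty
  simpa [pvByCat, PySem.Dict.keys_empty, PySem.Set.update_nil_left] using this

theorem pv_contains_pvByCat (l : List String) (c : String) :
    ((pvByCat l).contains c = false) ↔ (l.filter (fun s => categorize_skill s == c)) = [] := by
  rw [← Bool.not_eq_true, PySem.Dict.contains_iff_mem_keys, pv_keys_pvByCat]
  simp [PySem.Set.mem_ofList, List.filter_eq_nil_iff]

-- ===== VERDICT (by name: the statement is the Claim_ definition above) =====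
theorem build_skill_chips_spec : Claim_equal_build_skill_chips := by
  intro l _
  show build_skill_chips l = build_skill_chips_alt l
  cases l with
  | nil => rfl
  | cons x xs =>
    have hne : (pvByCat (x :: xs)).items ≠ [] := by
      intro h
      have hk := pv_keys_pvByCat (x :: xs)
      rw [show (pvByCat (x :: xs)).keys = ((pvByCat (x :: xs)).items.map (fun p => p.1)) from rfl, h] at hk
      simp [PySem.Set.ofList_cons] at hk
    have G : ∀ (c p : String), (∀ s, (categorize_skill s == c) = PySem.Str.startswith s p) →
        ((pvByCat (x :: xs)).getD c [] = (((x :: xs).filter (fun s => PySem.Str.startswith s p)).map clean_skill)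
         ∧ (((pvByCat (x :: xs)).contains c = false) ↔ (((x :: xs).filter (fun s => PySem.Str.startswith s p)).map clean_skill = []))) := by
      intro c p h
      have F : ((x :: xs).filter (fun s => categorize_skill s == c)) = ((x :: xs).filter (fun s => PySem.Str.startswith s p)) :=
        List.filter_congr (fun s _ => h s)
      constructor
      · rw [pv_getD_pvByCat, F]
      · rw [pv_contains_pvByCat, F, List.map_eq_nil_iff]
    obtain ⟨g1a, g1b⟩ := G "Fachkompetenz" "FK_" (fun s => (pv_cat_char s).1)
    obtain ⟨g2a, g2b⟩ := G "TechSkill" "FD_" (fun s => (pv_cat_char s).2.1)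
    obtain ⟨g3a, g3b⟩ := G "Sozialkompetenz" "SK_" (fun s => (pv_cat_char s).2.2.1)
    obtain ⟨g4a, g4b⟩ := G "Methodenkompetenz" "MK_" (fun s => (pv_cat_char s).2.2.2.1)
    obtain ⟨g5a, g5b⟩ := G "Personalkompetenz" "PK_" (fun s => (pv_cat_char s).2.2.2.2)
    simp only [build_skill_chips, build_skill_chips_alt]
    rw [if_neg hne, if_neg (List.cons_ne_nil x xs)]
    simp only [List.foldl, g1a, g2a, g3a, g4a, g5a, g1b, g2b, g3b, g4b, g5b]
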